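-- pv_equiv track=rewrite | github.com/Aacashh/logai | streamlit-app/plotting.py | _get_curve_color
-- ===== SOURCE A (Python) =====
-- COLORS = {
--     'GR': '#00AA00',           # Green for Gamma Ray
--     'GR_FILL': '#90EE90',      # Light green for sand shading
--     'CALIPER': '#000000',      # Black for Caliper curve
--     'RES_DEEP': '#0066CC',     # Blue for Deep Resistivity
--     'RES_MED': '#CC0000',      # Red for Medium Resistivity
--     'RES_SHAL': '#FF8C00',     # Orange for Shallow Resistivity
--     'DENS': '#CC0000',         # Red for Density
--     'NEUT': '#0066CC',         # Blue for Neutron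
--     'CROSS_GAS': '#FFFF00',    # Yellow for gas crossover
--     'CROSS_SHALE': '#808080',  # Grey for shale crossover
--     'GRID': '#CCCCCC',         # Light grey grid
--     'TRACK_BG': '#FFFFFF',     # White track background
--     'HEADER_BG': '#F2F2F2',    # Light grey header background
--     'BORDER': '#333333',       # Dark border
-- }
--
-- def _get_curve_color(curve_name, mapping):
--     """Get industry-standard color for a curve type."""
--     curve_upper = curve_name.upper()
--
--     if 'GR' in curve_upper:
--         return COLORS['GR']
--     elif any(r in curve_upper for r in ['RT', 'RLLD', 'RDEP', 'ILD', 'RES']):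
--         return COLORS['RES_DEEP']
--     elif any(r in curve_upper for r in ['RM', 'RLLM', 'ILM']):
--         return COLORS['RES_MED']
--     elif any(r in curve_upper for r in ['RS', 'RXOZ', 'MSFL']):
--         return COLORS['RES_SHAL']
--     elif any(r in curve_upper for r in ['RHOB', 'RHOZ', 'DEN']):
--         return COLORS['DENS']
--     elif any(r in curve_upper for r in ['NPHI', 'TNPH', 'NEU']):
--         return COLORS['NEUT']
--     else:
--         return '#3b82f6'  # Default blue
-- ===== SOURCE B (Python) =====
-- _DEFAULT = '#3b82f6'
--
-- # token -> (priority, color); priority = index of the branch in the spec's cascade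
-- _TABLE = {
--     'GR': (0, '#00AA00'),
--     'RT': (1, '#0066CC'), 'RLLD': (1, '#0066CC'), 'RDEP': (1, '#0066CC'),
--     'ILD': (1, '#0066CC'), 'RES': (1, '#0066CC'),
--     'RM': (2, '#CC0000'), 'RLLM': (2, '#CC0000'), 'ILM': (2, '#CC0000'),
--     'RS': (3, '#FF8C00'), 'RXOZ': (3, '#FF8C00'), 'MSFL': (3, '#FF8C00'),
--     'RHOB': (4, '#CC0000'), 'RHOZ': (4, '#CC0000'), 'DEN': (4, '#CC0000'),
--     'NPHI': (5, '#0066CC'), 'TNPH': (5, '#0066CC'), 'NEU': (5, '#0066CC'),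
-- }
--
-- def _get_curve_color(curve_name, mapping):
--     # Single scan over the name: look every substring of length 2..4 up in a
--     # hash table and keep the hit with the smallest priority.
--     u = curve_name.upper()
--     best = None
--     for i in range(len(u)):
--         for L in (2, 3, 4):
--             hit = _TABLE.get(u[i:i+L])
--             if hit is not None and (best is None or hit[0] < best[0]):
--                 best = hit
--     return best[1] if best is not None else _DEFAULT
-- ===== Notes on version B (the rewrite author's own statement) =====
-- stated objective: alternative
-- what changed: B inverts the search: instead of A's if/elif cascade testing each hardcoded token group for containment in the name, B makes one pass over the uppercased name, looks every substring of length 2-4 up in a token->(priority,color) dict, and returns the color of the minimum-priority hit (default if none).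
import Mathlib
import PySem

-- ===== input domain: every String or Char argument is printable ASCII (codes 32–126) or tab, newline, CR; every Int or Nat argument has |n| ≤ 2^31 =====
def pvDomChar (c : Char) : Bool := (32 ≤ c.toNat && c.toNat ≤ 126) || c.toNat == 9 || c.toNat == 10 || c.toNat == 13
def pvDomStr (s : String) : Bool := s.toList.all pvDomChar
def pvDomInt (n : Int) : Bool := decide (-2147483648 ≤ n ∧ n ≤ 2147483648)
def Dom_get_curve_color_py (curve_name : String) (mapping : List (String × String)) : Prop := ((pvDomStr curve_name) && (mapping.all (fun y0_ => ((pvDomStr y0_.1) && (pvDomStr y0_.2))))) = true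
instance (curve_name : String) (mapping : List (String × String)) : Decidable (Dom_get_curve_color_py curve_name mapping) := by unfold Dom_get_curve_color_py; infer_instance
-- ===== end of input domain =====

-- B inverts A's token-containment cascade: one scan over the name looking every
-- substring of length 2..4 up in a token table and keeping the minimum-priority hit
-- (alternative algorithm; same result proved below).
-- ===== PORT A =====
def pyCOLORS : PySem.Dict String String := PySem.Dict.ofList
  [("GR", "#00AA00"), ("GR_FILL", "#90EE90"), ("CALIPER", "#000000"),
   ("RES_DEEP", "#0066CC"), ("RES_MED", "#CC0000"), ("RES_SHAL", "#FF8C00"),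
   ("DENS", "#CC0000"), ("NEUT", "#0066CC"), ("CROSS_GAS", "#FFFF00"),
   ("CROSS_SHALE", "#808080"), ("GRID", "#CCCCCC"), ("TRACK_BG", "#FFFFFF"),
   ("HEADER_BG", "#F2F2F2"), ("BORDER", "#333333")]

def get_curve_color_py (curve_name : String) (mapping : List (String × String)) : String :=
  let curve_upper := PySem.Str.upper curve_name
  if PySem.Str.isIn "GR" curve_upper then
    pyCOLORS.getD "GR" ""
  else if (["RT", "RLLD", "RDEP", "ILD", "RES"].any fun r => PySem.Str.isIn r curve_upper) then
    pyCOLORS.getD "RES_DEEP" ""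
  else if (["RM", "RLLM", "ILM"].any fun r => PySem.Str.isIn r curve_upper) then
    pyCOLORS.getD "RES_MED" ""
  else if (["RS", "RXOZ", "MSFL"].any fun r => PySem.Str.isIn r curve_upper) then
    pyCOLORS.getD "RES_SHAL" ""
  else if (["RHOB", "RHOZ", "DEN"].any fun r => PySem.Str.isIn r curve_upper) then
    pyCOLORS.getD "DENS" ""
  else if (["NPHI", "TNPH", "NEU"].any fun r => PySem.Str.isIn r curve_upper) then
    pyCOLORS.getD "NEUT" ""
  else
    "#3b82f6"

-- ===== PORT B =====
-- _TABLE: token -> (priority, color)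
def pvTable : PySem.Dict String (Nat × String) := PySem.Dict.ofList
  [("GR", (0, "#00AA00")),
   ("RT", (1, "#0066CC")), ("RLLD", (1, "#0066CC")), ("RDEP", (1, "#0066CC")),
   ("ILD", (1, "#0066CC")), ("RES", (1, "#0066CC")),
   ("RM", (2, "#CC0000")), ("RLLM", (2, "#CC0000")), ("ILM", (2, "#CC0000")),
   ("RS", (3, "#FF8C00")), ("RXOZ", (3, "#FF8C00")), ("MSFL", (3, "#FF8C00")),
   ("RHOB", (4, "#CC0000")), ("RHOZ", (4, "#CC0000")), ("DEN", (4, "#CC0000")),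
   ("NPHI", (5, "#0066CC")), ("TNPH", (5, "#0066CC")), ("NEU", (5, "#0066CC"))]

-- 'if hit is not None and (best is None or hit[0] < best[0]): best = hit'
def pvBestUpd (best hit : Option (Nat × String)) : Option (Nat × String) :=
  match hit with
  | none => best
  | some v =>
    match best with
    | none => some v
    | some b => if v.1 < b.1 then some v else some b

def get_curve_color_py_alt (curve_name : String) (mapping : List (String × String)) : String :=
  let u := PySem.Str.upper curve_name
  match (PySem.List.pyRange 0 (PySem.Str.len u)).foldl
      (fun best i => (([2, 3, 4] : List Int)).foldl
        (fun best L => pvBestUpd best (pvTable.get? (PySem.Str.slice u (some i) (some (i + L))))) best)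
      (none : Option (Nat × String)) with
  | some v => v.2
  | none => "#3b82f6"

-- ===== PRECONDITION & SPEC =====
def Spec_get_curve_color_py (curve_name : String) (mapping : List (String × String)) (out : String) : Prop := out = get_curve_color_py_alt curve_name mapping
instance (curve_name : String) (mapping : List (String × String)) (out : String) : Decidable (Spec_get_curve_color_py curve_name mapping out) := by unfold Spec_get_curve_color_py; infer_instance

-- ===== CLAIM =====
def Claim_equal_get_curve_color_py : Prop := ∀ (curve_name : String) (mapping : List (String × String)), Dom_get_curve_color_py curve_name mapping → Spec_get_curve_color_py curve_name mapping (get_curve_color_py curve_name mapping)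

-- ===== LEMMAS AND PROOFS =====
-- proof-only helpers: the six priority groups of A's cascade and their colors
def pvGroups : Nat → List String
  | 0 => ["GR"]
  | 1 => ["RT", "RLLD", "RDEP", "ILD", "RES"]
  | 2 => ["RM", "RLLM", "ILM"]
  | 3 => ["RS", "RXOZ", "MSFL"]
  | 4 => ["RHOB", "RHOZ", "DEN"]
  | _ => ["NPHI", "TNPH", "NEU"]

def pvColor : Nat → String
  | 0 => "#00AA00"
  | 1 => "#0066CC"
  | 2 => "#CC0000"
  | 3 => "#FF8C00"
  | 4 => "#CC0000"
  | _ => "#0066CC"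

def pvVal (p : Nat) : Nat × String := (p, pvColor p)

-- the flat list of table lookups B's double loop performs
def pvHits (u : String) : List (Option (Nat × String)) :=
  (List.range u.toList.length).flatMap
    (fun (k : Nat) => (([2, 3, 4] : List Int)).map
      (fun L => pvTable.get? (PySem.Str.slice u (some (k : Int)) (some ((k : Int) + L)))))

lemma pvBestUpd_cases (b x : Option (Nat × String)) : pvBestUpd b x = b ∨ pvBestUpd b x = x := by
  unfold pvBestUpd
  cases x with
  | none => exact Or.inl rfl
  | some v =>
    cases b with
    | none => exact Or.inr rfl
    | some bb =>
      by_cases h : v.1 < bb.1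
      · simp [h]
      · simp [h]

lemma pvBestUpd_left (b x : Option (Nat × String)) (v : Nat × String) (hb : b = some v) :
    ∃ w, pvBestUpd b x = some w ∧ w.1 ≤ v.1 := by
  subst hb
  unfold pvBestUpd
  cases x with
  | none => exact ⟨v, rfl, le_refl _⟩
  | some y =>
    by_cases h : y.1 < v.1
    · exact ⟨y, by simp [h], by omega⟩
    · exact ⟨v, by simp [h], le_refl _⟩

lemma pvBestUpd_right (b : Option (Nat × String)) (v : Nat × String) :
    ∃ w, pvBestUpd b (some v) = some w ∧ w.1 ≤ v.1 := by
  unfold pvBestUpd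
  cases b with
  | none => exact ⟨v, rfl, le_refl _⟩
  | some bb =>
    by_cases h : v.1 < bb.1
    · exact ⟨v, by simp [h], le_refl _⟩
    · exact ⟨bb, by simp [h], by omega⟩

lemma pvFold_mem (ℓ : List (Option (Nat × String))) :
    ∀ b, List.foldl pvBestUpd b ℓ = b ∨ List.foldl pvBestUpd b ℓ ∈ ℓ := by
  induction ℓ with
  | nil => intro b; exact Or.inl rfl
  | cons x t ih =>
    intro b
    rw [List.foldl_cons]
    rcases ih (pvBestUpd b x) with h | h
    · rw [h]
      rcases pvBestUpd_cases b x with h2 | h2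
      · exact Or.inl h2
      · rw [h2]; exact Or.inr List.mem_cons_self
    · exact Or.inr (List.mem_cons_of_mem _ h)

lemma pvFold_le (ℓ : List (Option (Nat × String))) :
    ∀ (b : Option (Nat × String)) (v : Nat × String), (b = some v ∨ some v ∈ ℓ) →
      ∃ w, List.foldl pvBestUpd b ℓ = some w ∧ w.1 ≤ v.1 := by
  induction ℓ with
  | nil =>
    intro b v h
    rcases h with hb | hm
    · exact ⟨v, by simp [hb], le_refl _⟩
    · simp at hm
  | cons x t ih =>
    intro b v h
    rw [List.foldl_cons]
    rcases h with hb | hm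
    · obtain ⟨w', hw', hle'⟩ := pvBestUpd_left b x v hb
      obtain ⟨w, hw, hle⟩ := ih (pvBestUpd b x) w' (Or.inl hw')
      exact ⟨w, hw, le_trans hle hle'⟩
    · rcases List.mem_cons.mp hm with hx | ht
      · subst hx
        obtain ⟨w', hw', hle'⟩ := pvBestUpd_right b v
        obtain ⟨w, hw, hle⟩ := ih (pvBestUpd b (some v)) w' (Or.inl hw')
        exact ⟨w, hw, le_trans hle hle'⟩
      · exact ih (pvBestUpd b x) v (Or.inr ht)

lemma pvLookup_shape (s : String) (v : Nat × String) (h : pvTable.get? s = some v) :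
    ∃ p, p < 6 ∧ v = pvVal p ∧ s ∈ pvGroups p := by
  have hit : pvTable.items =
    [("GR", (0, "#00AA00")),
     ("RT", (1, "#0066CC")), ("RLLD", (1, "#0066CC")), ("RDEP", (1, "#0066CC")),
     ("ILD", (1, "#0066CC")), ("RES", (1, "#0066CC")),
     ("RM", (2, "#CC0000")), ("RLLM", (2, "#CC0000")), ("ILM", (2, "#CC0000")),
     ("RS", (3, "#FF8C00")), ("RXOZ", (3, "#FF8C00")), ("MSFL", (3, "#FF8C00")),
     ("RHOB", (4, "#CC0000")), ("RHOZ", (4, "#CC0000")), ("DEN", (4, "#CC0000")),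
     ("NPHI", (5, "#0066CC")), ("TNPH", (5, "#0066CC")), ("NEU", (5, "#0066CC"))] := by rfl
  rw [PySem.Dict.get?, hit] at h
  obtain ⟨a, hfind, hv⟩ := Option.map_eq_some_iff.mp h
  have hpred := List.find?_some hfind
  have hmem := List.mem_of_find?_eq_some hfind
  subst hv
  simp only [List.mem_cons, List.not_mem_nil, or_false] at hmem
  rcases hmem with rfl|rfl|rfl|rfl|rfl|rfl|rfl|rfl|rfl|rfl|rfl|rfl|rfl|rfl|rfl|rfl|rfl|rfl <;>
    rw [← beq_iff_eq.mp hpred]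
  · exact ⟨0, by omega, rfl, by decide⟩
  · exact ⟨1, by omega, rfl, by decide⟩
  · exact ⟨1, by omega, rfl, by decide⟩
  · exact ⟨1, by omega, rfl, by decide⟩
  · exact ⟨1, by omega, rfl, by decide⟩
  · exact ⟨1, by omega, rfl, by decide⟩
  · exact ⟨2, by omega, rfl, by decide⟩
  · exact ⟨2, by omega, rfl, by decide⟩
  · exact ⟨2, by omega, rfl, by decide⟩
  · exact ⟨3, by omega, rfl, by decide⟩
  · exact ⟨3, by omega, rfl, by decide⟩
  · exact ⟨3, by omega, rfl, by decide⟩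
  · exact ⟨4, by omega, rfl, by decide⟩
  · exact ⟨4, by omega, rfl, by decide⟩
  · exact ⟨4, by omega, rfl, by decide⟩
  · exact ⟨5, by omega, rfl, by decide⟩
  · exact ⟨5, by omega, rfl, by decide⟩
  · exact ⟨5, by omega, rfl, by decide⟩

lemma pvSlice_isIn (u t : String) (k : Nat) (L : Int) (hL : 0 ≤ L)
    (h : PySem.Str.slice u (some (k : Int)) (some ((k : Int) + L)) = t) :
    PySem.Str.isIn t u = true := by
  rw [PySem.Str.isIn_iff_infix, ← h, PySem.Str.toList_slice, PySem.Chars.slice_eq_listSlice,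
    PySem.List.slice_toNat _ (by omega) (by omega)]
  exact (List.take_prefix _ _).isInfix.trans (List.drop_suffix _ _).isInfix

lemma pvIsIn_slice (u t : String) (hne : t.toList ≠ []) (h : PySem.Str.isIn t u = true) :
    ∃ k, k < u.toList.length ∧
      PySem.Str.slice u (some (k : Int)) (some ((k : Int) + (t.toList.length : Int))) = t := by
  have h' : PySem.Chars.isIn t.toList u.toList = true := by
    rw [← PySem.Str.isIn_eq]; exact h
  obtain ⟨j, hpre⟩ := (PySem.Chars.exists_prefix_drop_iff_isIn t.toList u.toList).mpr h'
  have hj : j < u.toList.length := by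
    by_contra hge
    rw [List.drop_eq_nil_of_le (by omega)] at hpre
    exact hne (List.prefix_nil.mp hpre)
  refine ⟨j, hj, String.toList_inj.mp ?_⟩
  rw [PySem.Str.toList_slice, PySem.Chars.slice_eq_listSlice, PySem.List.slice_natCast_add]
  exact (List.prefix_iff_eq_take.mp hpre).symm

lemma pvMem_hits_iff (u : String) (x : Option (Nat × String)) :
    x ∈ pvHits u ↔ ∃ k : Nat, k < u.toList.length ∧ ∃ L : Int,
      pvTable.get? (PySem.Str.slice u (some (k : Int)) (some ((k : Int) + L))) = x ∧
      L ∈ ([2, 3, 4] : List Int) := by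
  unfold pvHits
  rw [List.mem_flatMap]
  constructor
  · rintro ⟨k, hk, hx⟩
    rw [List.mem_map] at hx
    obtain ⟨L, hL, hLx⟩ := hx
    exact ⟨k, List.mem_range.mp hk, L, hLx, hL⟩
  · rintro ⟨k, hk, L, hx, hL⟩
    exact ⟨k, List.mem_range.mpr hk, List.mem_map.mpr ⟨L, hL, hx⟩⟩

lemma pvCand_iff (u : String) (p : Nat) (hp : p < 6) :
    (some (pvVal p) ∈ pvHits u) ↔ ((pvGroups p).any fun t => PySem.Str.isIn t u) = true := by
  constructor
  · intro h
    obtain ⟨k, hk, L, hget, hLmem⟩ := (pvMem_hits_iff _ _).mp h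
    obtain ⟨q, hq, hval, hmem⟩ := pvLookup_shape _ _ hget
    have hpq : p = q := congrArg Prod.fst hval
    subst hpq
    have hL0 : 0 ≤ L := by
      simp only [List.mem_cons, List.not_mem_nil, or_false] at hLmem
      rcases hLmem with rfl | rfl | rfl <;> omega
    rw [List.any_eq_true]
    exact ⟨_, hmem, pvSlice_isIn u _ k L hL0 rfl⟩
  · intro h
    rw [List.any_eq_true] at h
    obtain ⟨t, htmem, hIn⟩ := h
    interval_cases p <;> fin_cases htmem <;>
      · obtain ⟨k, hk, hs⟩ := pvIsIn_slice u _ (by decide) hIn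
        exact (pvMem_hits_iff _ _).mpr ⟨k, hk, _, by rw [hs]; rfl, by decide⟩

lemma pvHits_shape (u : String) : ∀ x ∈ pvHits u, x = none ∨ ∃ p, p < 6 ∧ x = some (pvVal p) := by
  intro x hx
  obtain ⟨k, hk, L, rfl, hL⟩ := (pvMem_hits_iff _ _).mp hx
  cases hq : pvTable.get? (PySem.Str.slice u (some (k : Int)) (some ((k : Int) + L))) with
  | none => exact Or.inl rfl
  | some v =>
    obtain ⟨p, hp, hv, _⟩ := pvLookup_shape _ _ hq
    exact Or.inr ⟨p, hp, congrArg some hv⟩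

lemma pvFold_char (ℓ : List (Option (Nat × String)))
    (hs : ∀ x ∈ ℓ, x = none ∨ ∃ p, p < 6 ∧ x = some (pvVal p)) :
    List.foldl pvBestUpd none ℓ =
      if some (pvVal 0) ∈ ℓ then some (pvVal 0)
      else if some (pvVal 1) ∈ ℓ then some (pvVal 1)
      else if some (pvVal 2) ∈ ℓ then some (pvVal 2)
      else if some (pvVal 3) ∈ ℓ then some (pvVal 3)
      else if some (pvVal 4) ∈ ℓ then some (pvVal 4)
      else if some (pvVal 5) ∈ ℓ then some (pvVal 5)
      else none := by
  split_ifs with h0 h1 h2 h3 h4 h5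
  · obtain ⟨w, hw, hle⟩ := pvFold_le ℓ none (pvVal 0) (Or.inr h0)
    rcases pvFold_mem ℓ none with hn | hm
    · rw [hw] at hn; exact absurd hn (by simp)
    · rcases hs _ hm with hx | ⟨q, hq, hx⟩
      · rw [hw] at hx; exact absurd hx (by simp)
      · have hwq : w = pvVal q := by rw [hw] at hx; exact Option.some.inj hx
        have hq1 : q ≤ 0 := by
          have hle2 := hle
          rw [hwq] at hle2
          simpa [pvVal] using hle2
        have hmemq : some (pvVal q) ∈ ℓ := hx ▸ hm
        have hqe : q = 0 := by
          interval_cases q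
          · rfl
        rw [hqe] at hx
        exact hx
  · obtain ⟨w, hw, hle⟩ := pvFold_le ℓ none (pvVal 1) (Or.inr h1)
    rcases pvFold_mem ℓ none with hn | hm
    · rw [hw] at hn; exact absurd hn (by simp)
    · rcases hs _ hm with hx | ⟨q, hq, hx⟩
      · rw [hw] at hx; exact absurd hx (by simp)
      · have hwq : w = pvVal q := by rw [hw] at hx; exact Option.some.inj hx
        have hq1 : q ≤ 1 := by
          have hle2 := hle
          rw [hwq] at hle2
          simpa [pvVal] using hle2
        have hmemq : some (pvVal q) ∈ ℓ := hx ▸ hm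
        have hqe : q = 1 := by
          interval_cases q
          · exact absurd hmemq h0
          · rfl
        rw [hqe] at hx
        exact hx
  · obtain ⟨w, hw, hle⟩ := pvFold_le ℓ none (pvVal 2) (Or.inr h2)
    rcases pvFold_mem ℓ none with hn | hm
    · rw [hw] at hn; exact absurd hn (by simp)
    · rcases hs _ hm with hx | ⟨q, hq, hx⟩
      · rw [hw] at hx; exact absurd hx (by simp)
      · have hwq : w = pvVal q := by rw [hw] at hx; exact Option.some.inj hx
        have hq1 : q ≤ 2 := by
          have hle2 := hle
          rw [hwq] at hle2
          simpa [pvVal] using hle2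
        have hmemq : some (pvVal q) ∈ ℓ := hx ▸ hm
        have hqe : q = 2 := by
          interval_cases q
          · exact absurd hmemq h0
          · exact absurd hmemq h1
          · rfl
        rw [hqe] at hx
        exact hx
  · obtain ⟨w, hw, hle⟩ := pvFold_le ℓ none (pvVal 3) (Or.inr h3)
    rcases pvFold_mem ℓ none with hn | hm
    · rw [hw] at hn; exact absurd hn (by simp)
    · rcases hs _ hm with hx | ⟨q, hq, hx⟩
      · rw [hw] at hx; exact absurd hx (by simp)
      · have hwq : w = pvVal q := by rw [hw] at hx; exact Option.some.inj hx
        have hq1 : q ≤ 3 := by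
          have hle2 := hle
          rw [hwq] at hle2
          simpa [pvVal] using hle2
        have hmemq : some (pvVal q) ∈ ℓ := hx ▸ hm
        have hqe : q = 3 := by
          interval_cases q
          · exact absurd hmemq h0
          · exact absurd hmemq h1
          · exact absurd hmemq h2
          · rfl
        rw [hqe] at hx
        exact hx
  · obtain ⟨w, hw, hle⟩ := pvFold_le ℓ none (pvVal 4) (Or.inr h4)
    rcases pvFold_mem ℓ none with hn | hm
    · rw [hw] at hn; exact absurd hn (by simp)
    · rcases hs _ hm with hx | ⟨q, hq, hx⟩
      · rw [hw] at hx; exact absurd hx (by simp)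
      · have hwq : w = pvVal q := by rw [hw] at hx; exact Option.some.inj hx
        have hq1 : q ≤ 4 := by
          have hle2 := hle
          rw [hwq] at hle2
          simpa [pvVal] using hle2
        have hmemq : some (pvVal q) ∈ ℓ := hx ▸ hm
        have hqe : q = 4 := by
          interval_cases q
          · exact absurd hmemq h0
          · exact absurd hmemq h1
          · exact absurd hmemq h2
          · exact absurd hmemq h3
          · rfl
        rw [hqe] at hx
        exact hx
  · obtain ⟨w, hw, hle⟩ := pvFold_le ℓ none (pvVal 5) (Or.inr h5)
    rcases pvFold_mem ℓ none with hn | hm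
    · rw [hw] at hn; exact absurd hn (by simp)
    · rcases hs _ hm with hx | ⟨q, hq, hx⟩
      · rw [hw] at hx; exact absurd hx (by simp)
      · have hwq : w = pvVal q := by rw [hw] at hx; exact Option.some.inj hx
        have hq1 : q ≤ 5 := by
          have hle2 := hle
          rw [hwq] at hle2
          simpa [pvVal] using hle2
        have hmemq : some (pvVal q) ∈ ℓ := hx ▸ hm
        have hqe : q = 5 := by
          interval_cases q
          · exact absurd hmemq h0
          · exact absurd hmemq h1
          · exact absurd hmemq h2
          · exact absurd hmemq h3
          · exact absurd hmemq h4
          · rfl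
        rw [hqe] at hx
        exact hx
  · rcases pvFold_mem ℓ none with hn | hm
    · exact hn
    · rcases hs _ hm with hx | ⟨q, hq, hx⟩
      · exact hx
      · exfalso
        have hmemq : some (pvVal q) ∈ ℓ := hx ▸ hm
        interval_cases q
        · exact absurd hmemq h0
        · exact absurd hmemq h1
        · exact absurd hmemq h2
        · exact absurd hmemq h3
        · exact absurd hmemq h4
        · exact absurd hmemq h5

lemma pvAlt_eq (curve_name : String) (mapping : List (String × String)) :
    get_curve_color_py_alt curve_name mapping =
      match List.foldl pvBestUpd none (pvHits (PySem.Str.upper curve_name)) with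
      | some v => v.2
      | none => "#3b82f6" := by
  unfold get_curve_color_py_alt pvHits
  simp only [PySem.Str.len_eq, PySem.List.pyRange_zero_natCast, List.foldl_flatMap, List.foldl_map]

-- ===== VERDICT =====
theorem get_curve_color_py_spec : Claim_equal_get_curve_color_py := by
  intro curve_name mapping _
  unfold Spec_get_curve_color_py
  rw [pvAlt_eq, pvFold_char _ (pvHits_shape _)]
  have e0 := pvCand_iff (PySem.Str.upper curve_name) 0 (by omega)
  have e1 := pvCand_iff (PySem.Str.upper curve_name) 1 (by omega)
  have e2 := pvCand_iff (PySem.Str.upper curve_name) 2 (by omega)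
  have e3 := pvCand_iff (PySem.Str.upper curve_name) 3 (by omega)
  have e4 := pvCand_iff (PySem.Str.upper curve_name) 4 (by omega)
  have e5 := pvCand_iff (PySem.Str.upper curve_name) 5 (by omega)
  unfold get_curve_color_py
  simp only [e0, e1, e2, e3, e4, e5, pvGroups, List.any_cons, List.any_nil, Bool.or_false]
  split_ifs <;> rfl
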